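-- pv_equiv track=rewrite | github.com/reenphygeorge/vPrompt | core/prompt.py | identify_timestamp_ranges
-- ===== SOURCE A (Python) =====
-- def identify_timestamp_ranges(timestamps):
--     if not timestamps:
--         return None
--
--     # Extract integer values from tuples
--     timestamps = [t[0] for t in timestamps]
--
--     # Sort timestamps in ascending order
--     timestamps.sort()
--
--     # Initialize variables
--     start_time = timestamps[0]
--     end_time = timestamps[0]
--     time_ranges = []
--
--     # Iterate through timestamps to find consecutive ranges
--     for time in timestamps[1:]:
--         if time == end_time or time == end_time + 1:
--             end_time = time
--         else:
--             # Add the current range to the list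
--             time_ranges.append(f"{start_time} - {end_time}")
--             # Start a new range
--             start_time = time
--             end_time = time
--     # Add the last range to the list
--     time_ranges.append(f"{start_time} - {end_time}")
--     return ', '.join(time_ranges)
-- ===== SOURCE B (Python) =====
-- def identify_timestamp_ranges(timestamps):
--     if not timestamps:
--         return None
--     uniq = sorted({t[0] for t in timestamps})
--     # A "gap" is an adjacent pair of distinct values that are not consecutive.
--     gaps = [(a, b) for a, b in zip(uniq, uniq[1:]) if b != a + 1]
--     starts = [uniq[0]] + [b for _, b in gaps]
--     ends = [a for a, _ in gaps] + [uniq[-1]]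
--     return ', '.join(f"{s} - {e}" for s, e in zip(starts, ends))
-- ===== Notes on version B (the rewrite author's own statement) =====
-- stated objective: alternative
-- what changed: Replaces A's running start/end accumulator loop with a stateless formulation: dedupe via sorted(set(...)), detect run boundaries by zipping the unique list with its own tail ('gaps'), derive the starts/ends lists from the gaps by comprehensions and zip them into range strings.
import Mathlib
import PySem

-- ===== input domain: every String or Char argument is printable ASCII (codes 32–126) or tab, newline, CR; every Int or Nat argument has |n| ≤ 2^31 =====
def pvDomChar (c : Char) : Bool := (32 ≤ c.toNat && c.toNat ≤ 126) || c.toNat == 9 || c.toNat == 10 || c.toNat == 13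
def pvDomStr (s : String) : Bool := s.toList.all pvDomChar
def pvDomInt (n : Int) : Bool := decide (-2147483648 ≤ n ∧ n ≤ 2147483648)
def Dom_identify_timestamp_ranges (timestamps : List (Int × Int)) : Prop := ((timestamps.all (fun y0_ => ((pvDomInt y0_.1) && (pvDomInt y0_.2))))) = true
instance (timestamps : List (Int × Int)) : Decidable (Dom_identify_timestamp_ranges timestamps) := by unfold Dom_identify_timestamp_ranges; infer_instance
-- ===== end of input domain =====

-- B replaces A's running start/end accumulator loop with a stateless gap-detection
-- formulation (sorted(set(...)), zip with the tail, boundary comprehensions); alternative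
-- decomposition, not claimed faster.

-- ===== PORT A =====

-- f"{s} - {e}"
def pvRender (s e : Int) : String := PySem.Int.toStr s ++ " - " ++ PySem.Int.toStr e

-- the loop body of A: state (start_time, end_time, time_ranges)
def pvStepA (acc : Int × Int × List String) (time : Int) : Int × Int × List String :=
  if time = acc.2.1 ∨ time = acc.2.1 + 1 then (acc.1, time, acc.2.2)
  else (time, time, acc.2.2 ++ [pvRender acc.1 acc.2.1])

def identify_timestamp_ranges (timestamps : List (Int × Int)) : Option String :=
  if timestamps = [] then none
  else
    -- timestamps = [t[0] for t in timestamps]; timestamps.sort()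
    match PySem.List.sorted (timestamps.map (fun t => t.1)) (fun x => x) false with
    | [] => none  -- unreachable: the sorted list is nonempty since timestamps is
    | v :: rest =>
      -- start_time = end_time = timestamps[0]; loop over timestamps[1:]
      let fin := rest.foldl pvStepA (v, v, [])
      some (PySem.Str.join ", " (fin.2.2 ++ [pvRender fin.1 fin.2.1]))

-- ===== PORT B =====
def identify_timestamp_ranges_alt (timestamps : List (Int × Int)) : Option String :=
  if timestamps = [] then none
  else
    -- uniq = sorted({t[0] for t in timestamps})
    match PySem.List.sorted (PySem.Set.ofList (timestamps.map (fun t => t.1))) (fun x => x) false with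
    | [] => none  -- unreachable: uniq is nonempty since timestamps is
    | u0 :: utail =>
      -- gaps = [(a, b) for a, b in zip(uniq, uniq[1:]) if b != a + 1]
      let gaps := ((u0 :: utail).zip (PySem.List.slice (u0 :: utail) (some 1) none)).filter
                    (fun p => p.2 ≠ p.1 + 1)
      -- starts = [uniq[0]] + [b for _, b in gaps]
      let starts := u0 :: gaps.map (fun p => p.2)
      -- ends = [a for a, _ in gaps] + [uniq[-1]]
      let ends := gaps.map (fun p => p.1) ++ [(u0 :: utail).getLast (by simp)]
      -- ', '.join(f"{s} - {e}" for s, e in zip(starts, ends))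
      some (PySem.Str.join ", " ((starts.zip ends).map (fun p => pvRender p.1 p.2)))

-- ===== PRECONDITION & SPEC =====
def Spec_identify_timestamp_ranges (timestamps : List (Int × Int)) (out : Option String) : Prop := out = identify_timestamp_ranges_alt timestamps
instance (timestamps : List (Int × Int)) (out : Option String) : Decidable (Spec_identify_timestamp_ranges timestamps out) := by unfold Spec_identify_timestamp_ranges; infer_instance

-- ===== CLAIM (what is proved, stated in full; the proofs are below) =====
def Claim_equal_identify_timestamp_ranges : Prop := ∀ (timestamps : List (Int × Int)), Dom_identify_timestamp_ranges timestamps → Spec_identify_timestamp_ranges timestamps (identify_timestamp_ranges timestamps)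

-- ===== LEMMAS AND PROOFS =====

-- the list of (start, end) ranges of a strictly increasing list, common reference shape
def pvRuns (s e : Int) : List Int → List (Int × Int)
  | [] => [(s, e)]
  | t :: xs => if t = e + 1 then pvRuns s t xs else (s, e) :: pvRuns t t xs

-- adjacent-duplicate removal relative to a previous element
def pvDD (prev : Int) : List Int → List Int
  | [] => []
  | t :: xs => if t = prev then pvDD prev xs else t :: pvDD t xs

theorem pvStepA_mid (acc : Int × Int × List String) (t : Int) : (pvStepA acc t).2.1 = t := by
  unfold pvStepA; split <;> rfl

-- A's fold skips elements equal to the running end_time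
theorem pvFoldA_dd (xs : List Int) : ∀ acc : Int × Int × List String,
    xs.foldl pvStepA acc = (pvDD acc.2.1 xs).foldl pvStepA acc := by
  induction xs with
  | nil => intro acc; rfl
  | cons t xs ih =>
    intro acc
    by_cases h : t = acc.2.1
    · have hstep : pvStepA acc t = acc := by
        obtain ⟨s, e, rs⟩ := acc
        simp only at h
        subst h
        simp [pvStepA]
      rw [List.foldl_cons, hstep, show pvDD acc.2.1 (t :: xs) = pvDD acc.2.1 xs from by
        simp [pvDD, h]]
      exact ih acc
    · rw [show pvDD acc.2.1 (t :: xs) = t :: pvDD t xs from by simp [pvDD, h],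
        List.foldl_cons, List.foldl_cons]
      have := ih (pvStepA acc t)
      rwa [pvStepA_mid acc t] at this

theorem pvMem_dd (xs : List Int) : ∀ (prev x : Int),
    (x ∈ prev :: pvDD prev xs) ↔ x ∈ prev :: xs := by
  induction xs with
  | nil => intro prev x; rfl
  | cons t xs ih =>
    intro prev x
    by_cases h : t = prev
    · subst h
      rw [show pvDD t (t :: xs) = pvDD t xs from by simp [pvDD], ih t x]
      simp only [List.mem_cons]
      tauto
    · rw [show pvDD prev (t :: xs) = t :: pvDD t xs from by simp [pvDD, h]]
      have h2 := ih t x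
      simp only [List.mem_cons] at h2 ⊢
      tauto

-- sorted-with-duplicates becomes strictly increasing after adjacent dedup
theorem pvPw_dd (xs : List Int) : ∀ prev : Int,
    (prev :: xs).Pairwise (· ≤ ·) → (prev :: pvDD prev xs).Pairwise (· < ·) := by
  induction xs with
  | nil => intro prev _; simp [pvDD]
  | cons t xs ih =>
    intro prev hp
    rcases List.pairwise_cons.mp hp with ⟨hall, hp2⟩
    by_cases h : t = prev
    · subst h
      rw [show pvDD t (t :: xs) = pvDD t xs from by simp [pvDD]]
      exact ih t hp2
    · rw [show pvDD prev (t :: xs) = t :: pvDD t xs from by simp [pvDD, h]]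
      have hlt : prev < t := lt_of_le_of_ne (hall t List.mem_cons_self) (fun hh => h hh.symm)
      have htail : (t :: pvDD t xs).Pairwise (· < ·) := ih t hp2
      refine List.pairwise_cons.mpr ⟨?_, htail⟩
      intro a ha
      rcases List.mem_cons.mp ha with rfl | ha2
      · exact hlt
      · exact lt_trans hlt ((List.pairwise_cons.mp htail).1 a ha2)

-- A's fold on a strictly increasing tail produces the pvRuns ranges
theorem pvFoldA_runs (xs : List Int) : ∀ (s e : Int) (rs : List String),
    (e :: xs).Pairwise (· < ·) →
    (xs.foldl pvStepA (s, e, rs)).2.2 ++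
        [pvRender (xs.foldl pvStepA (s, e, rs)).1 (xs.foldl pvStepA (s, e, rs)).2.1] =
      rs ++ (pvRuns s e xs).map (fun p => pvRender p.1 p.2) := by
  induction xs with
  | nil => intro s e rs _; simp [pvRuns]
  | cons t xs ih =>
    intro s e rs hc
    rcases List.pairwise_cons.mp hc with ⟨hall, hp2⟩
    have hlt : e < t := hall t List.mem_cons_self
    by_cases h : t = e + 1
    · rw [show pvRuns s e (t :: xs) = pvRuns s t xs from by simp [pvRuns, h]]
      have hstep : pvStepA (s, e, rs) t = (s, t, rs) := by
        unfold pvStepA; rw [if_pos (Or.inr h)]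
      rw [List.foldl_cons, hstep]
      exact ih s t rs hp2
    · have hne : ¬ (t = e ∨ t = e + 1) := by
        rintro (rfl | hh)
        · exact lt_irrefl t hlt
        · exact h hh
      have hstep : pvStepA (s, e, rs) t = (t, t, rs ++ [pvRender s e]) := by
        unfold pvStepA; rw [if_neg hne]
      rw [show pvRuns s e (t :: xs) = (s, e) :: pvRuns t t xs from by simp [pvRuns, h]]
      rw [List.foldl_cons, hstep, ih t t (rs ++ [pvRender s e]) hp2]
      simp

-- the gap comprehension as a structural recursion over adjacent pairs
def pvGaps (prev : Int) : List Int → List (Int × Int)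
  | [] => []
  | t :: xs => if t ≠ prev + 1 then (prev, t) :: pvGaps t xs else pvGaps t xs

theorem pvZipFilter_gaps (xs : List Int) : ∀ a : Int,
    ((a :: xs).zip xs).filter (fun p => p.2 ≠ p.1 + 1) = pvGaps a xs := by
  induction xs with
  | nil => intro a; rfl
  | cons t xs ih =>
    intro a
    rw [List.zip_cons_cons, List.filter_cons]
    by_cases h : t ≠ a + 1
    · rw [show pvGaps a (t :: xs) = (a, t) :: pvGaps t xs from by simp [pvGaps, h],
        if_pos (by simpa using h), ih t]
    · rw [show pvGaps a (t :: xs) = pvGaps t xs from by simp [pvGaps, h],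
        if_neg (by simpa using h)]
      exact ih t

-- B's starts/ends zip equals pvRuns on a strictly increasing list
theorem pvZip_runs (xs : List Int) : ∀ (s e : Int), (e :: xs).Pairwise (· < ·) →
    (s :: (pvGaps e xs).map (fun p => p.2)).zip
      ((pvGaps e xs).map (fun p => p.1) ++ [(e :: xs).getLast (by simp)]) = pvRuns s e xs := by
  induction xs with
  | nil => intro s e _; rfl
  | cons t xs ih =>
    intro s e hc
    rcases List.pairwise_cons.mp hc with ⟨hall, hp2⟩
    have hlast : (e :: t :: xs).getLast (by simp) = (t :: xs).getLast (by simp) :=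
      List.getLast_cons (by simp)
    by_cases h : t = e + 1
    · rw [show pvRuns s e (t :: xs) = pvRuns s t xs from by simp [pvRuns, h],
        show pvGaps e (t :: xs) = pvGaps t xs from by simp [pvGaps, h], hlast]
      exact ih s t hp2
    · rw [show pvRuns s e (t :: xs) = (s, e) :: pvRuns t t xs from by simp [pvRuns, h],
        show pvGaps e (t :: xs) = (e, t) :: pvGaps t xs from by simp [pvGaps, h], hlast]
      rw [List.map_cons, List.map_cons, List.cons_append, List.zip_cons_cons, ih t t hp2]

-- uniq = sorted(set(values)) is exactly head :: adjacent-dedup of sorted(values)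
theorem pvUniq_eq (vals : List Int) (v : Int) (rest : List Int)
    (hs : PySem.List.sorted vals (fun x => x) false = v :: rest) :
    PySem.List.sorted (PySem.Set.ofList vals) (fun x => x) false = v :: pvDD v rest := by
  have hperm : (v :: rest).Perm vals := hs ▸ PySem.List.sorted_perm vals (fun x => x) false
  have hpw : (v :: rest).Pairwise (· ≤ ·) := by
    have := PySem.List.sorted_pairwise vals (fun x => x)
    rw [hs] at this
    simpa using this
  have hpwlt : (v :: pvDD v rest).Pairwise (· < ·) := pvPw_dd rest v hpw
  have hnodup : (v :: pvDD v rest).Nodup := hpwlt.imp ne_of_lt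
  have hmem : ∀ x, x ∈ v :: pvDD v rest ↔ x ∈ PySem.Set.ofList vals := by
    intro x
    rw [pvMem_dd, PySem.Set.mem_ofList, hperm.mem_iff]
  have hperm2 : (v :: pvDD v rest).Perm (PySem.Set.ofList vals) :=
    (List.perm_ext_iff_of_nodup hnodup (PySem.Set.nodup_ofList vals)).mpr hmem
  exact PySem.List.sorted_eq_of_perm_of_pairwise_lt _ _ _ hperm2 (by simpa using hpwlt)

-- ===== VERDICT (by name: the statement is the Claim_ definition above) =====
theorem identify_timestamp_ranges_spec : Claim_equal_identify_timestamp_ranges := by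
  intro timestamps _
  unfold Spec_identify_timestamp_ranges identify_timestamp_ranges identify_timestamp_ranges_alt
  by_cases hts : timestamps = []
  · simp [hts]
  · rw [if_neg hts, if_neg hts]
    have hsne : PySem.List.sorted (timestamps.map (fun t => t.1)) (fun x => x) false ≠ [] := by
      simp only [ne_eq, PySem.List.sorted_eq_nil_iff, List.map_eq_nil_iff]
      exact hts
    obtain ⟨v, rest, hs⟩ := List.exists_cons_of_ne_nil hsne
    have huniq := pvUniq_eq (timestamps.map (fun t => t.1)) v rest hs
    rw [hs, huniq]
    have hpw : (v :: rest).Pairwise (· ≤ ·) := by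
      have := PySem.List.sorted_pairwise (timestamps.map (fun t => t.1)) (fun x => x)
      rw [hs] at this; simpa using this
    have hpwlt : (v :: pvDD v rest).Pairwise (· < ·) := pvPw_dd rest v hpw
    simp only [PySem.List.slice_from_one, List.tail_cons]
    rw [show List.filter (fun p => decide (p.2 ≠ p.1 + 1))
          ((v :: pvDD v rest).zip (pvDD v rest)) = pvGaps v (pvDD v rest) from
        pvZipFilter_gaps (pvDD v rest) v]
    rw [pvZip_runs (pvDD v rest) v v hpwlt]
    have hfold := pvFoldA_dd rest (v, v, ([] : List String))
    simp only at hfold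
    rw [hfold]
    rw [pvFoldA_runs (pvDD v rest) v v [] hpwlt]
    simp
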